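-- pv_equiv track=rewrite | github.com/abdeladem01/TAJINES-Polytech | PROJET TAJINES POLYTECH/Sous Linux/quilles.py | afficheQuilles
-- ===== SOURCE A (Python) =====
-- def afficheQuilles(q,NTotal):    #q est la liste des quilles debouts et NTotal est le nombre de quilles totales
--     v=0 #Etant donné qu'on va effectué une verification de gauche à droite, k est 0 au début, sa valeur va avancer dans la boucle while (ligne 24)
--     ligne=[] #ligne est une liste vierge
--     quilles=""
--     for liste in q:
--           j=liste[0] #j prend donc la valeur la petite de l'intervalle [deb,fin]
--           while j<=liste[1]:
--               if j not in ligne: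
--                   ligne.append(j) #Ajouter à la liste ligne (vierge au début la valeur de j, si j n'y est pas déja)
--               j+=1
--     while v<NTotal:  #On commence ainsi la vérification de gauche à droite dont j'ai parlé en commentaire dans la ligne 12
--         if v in ligne :
--             quilles=quilles+"|"   #Si k appartient à la liste des lignes (quilles debout) alors afficher une quille
--         else :
--             quilles=quilles+"."   #Dans ce cas, la quille est représentée par un point car elle n'appartient pas à la liste, conséquence du fait qu'elle est tombée
--         v+=1
--     return quilles
-- ===== SOURCE B (Python) =====
-- def afficheQuilles(q, NTotal):
--     n = max(NTotal, 0)
--     segs = []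
--     for l in q:
--         a = max(l[0], 0)
--         b = min(l[1], n - 1)
--         if a <= b:
--             segs.append((a, b))
--     segs.sort(key=lambda s: s[0])
--     out = ""
--     cur = 0
--     for a, b in segs:
--         if a > cur:
--             out += "." * (a - cur)
--             cur = a
--         if b + 1 > cur:
--             out += "|" * (b + 1 - cur)
--             cur = b + 1
--     out += "." * (n - cur)
--     return out
-- ===== Notes on version B (the rewrite author's own statement) =====
-- stated objective: faster
-- what changed: Instead of materialising every standing-pin index in a dedup list and testing membership position by position, B clips each interval to [0,n), sorts the clipped segments by start, and emits runs of '|' and '.' with a single cursor sweep.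
import Mathlib
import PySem

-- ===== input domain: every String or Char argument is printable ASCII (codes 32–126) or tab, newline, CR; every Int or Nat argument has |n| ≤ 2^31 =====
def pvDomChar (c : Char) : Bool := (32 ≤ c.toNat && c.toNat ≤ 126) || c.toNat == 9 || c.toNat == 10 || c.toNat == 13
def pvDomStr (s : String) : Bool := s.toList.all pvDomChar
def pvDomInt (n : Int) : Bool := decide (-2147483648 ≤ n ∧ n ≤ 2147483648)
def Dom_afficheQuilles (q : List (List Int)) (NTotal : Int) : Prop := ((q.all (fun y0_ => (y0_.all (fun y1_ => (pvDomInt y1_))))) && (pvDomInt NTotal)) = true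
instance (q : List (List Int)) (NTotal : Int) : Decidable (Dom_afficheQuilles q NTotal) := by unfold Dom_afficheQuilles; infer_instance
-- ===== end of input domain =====

-- B replaces A's per-position membership scan over a dedup list by clipping the intervals
-- to [0,n), sorting them by start and emitting runs with one cursor sweep (objective: faster).


-- ===== PORT A =====
-- inner 'while j <= liste[1]' loop: append j to ligne when not already present
def addInterval (ligne : List Int) (j b : Int) : List Int :=
  if _h : j ≤ b then
    addInterval (if j ∈ ligne then ligne else ligne ++ [j]) (j + 1) b
  else ligne
termination_by (b + 1 - j).toNat
decreasing_by omega

-- second 'while v < NTotal' loop; the Python string accumulator is carried as its List Char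
def buildRow (ligne : List Int) (quilles : List Char) (v NTotal : Int) : List Char :=
  if _h : v < NTotal then
    buildRow ligne (quilles ++ (if v ∈ ligne then ['|'] else ['.'])) (v + 1) NTotal
  else quilles
termination_by (NTotal - v).toNat
decreasing_by omega

-- liste[0]/liste[1] raise IndexError on short lists; excluded by Pre_, getD 0 is the off-domain stub
def afficheQuilles (q : List (List Int)) (NTotal : Int) : String :=
  let ligne := q.foldl (fun ligne liste =>
    addInterval ligne ((PySem.List.pyGet? liste 0).getD 0) ((PySem.List.pyGet? liste 1).getD 0)) []
  String.ofList (buildRow ligne [] 0 NTotal)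

-- ===== PORT B =====
-- one step of B's 'for a, b in segs' cursor loop (state: output chars, cursor)
def stepB (st : List Char × Int) (s : Int × Int) : List Char × Int :=
  let st1 := if s.1 > st.2 then (st.1 ++ List.replicate (s.1 - st.2).toNat '.', s.1) else st
  if s.2 + 1 > st1.2 then (st1.1 ++ List.replicate (s.2 + 1 - st1.2).toNat '|', s.2 + 1) else st1

def afficheQuilles_alt (q : List (List Int)) (NTotal : Int) : String :=
  let n := max NTotal 0
  let segs := q.foldl (fun segs l =>
    if max ((PySem.List.pyGet? l 0).getD 0) 0 ≤ min ((PySem.List.pyGet? l 1).getD 0) (n - 1) then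
      segs ++ [(max ((PySem.List.pyGet? l 0).getD 0) 0, min ((PySem.List.pyGet? l 1).getD 0) (n - 1))]
    else segs) []
  let sorted := PySem.List.sorted segs (fun s => s.1) false
  let st := sorted.foldl stepB ([], 0)
  String.ofList (st.1 ++ List.replicate (n - st.2).toNat '.')

-- ===== PRECONDITION & SPEC =====
-- Python A evaluates liste[0] and liste[1] for every liste in q: a sublist with fewer than
-- two elements raises IndexError, so exactly those inputs are excluded.
def Pre_afficheQuilles (q : List (List Int)) (_NTotal : Int) : Prop := ∀ l ∈ q, 2 ≤ l.length
instance (q : List (List Int)) (NTotal : Int) : Decidable (Pre_afficheQuilles q NTotal) := by unfold Pre_afficheQuilles; infer_instance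
def pvWitness_afficheQuilles : List (List Int) × Int := ([[1, 3], [6, 6]], 8)

def Spec_afficheQuilles (q : List (List Int)) (NTotal : Int) (out : String) : Prop := out = afficheQuilles_alt q NTotal
instance (q : List (List Int)) (NTotal : Int) (out : String) : Decidable (Spec_afficheQuilles q NTotal out) := by unfold Spec_afficheQuilles; infer_instance

-- ===== CLAIM (what is proved, stated in full; the proofs are below) =====
def Claim_equal_afficheQuilles : Prop := ∀ (q : List (List Int)) (NTotal : Int), Dom_afficheQuilles q NTotal → Pre_afficheQuilles q NTotal → Spec_afficheQuilles q NTotal (afficheQuilles q NTotal)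

-- ===== LEMMAS AND PROOFS =====

-- first element of liste (with A's off-domain stub), second element
def aOf (l : List Int) : Int := (PySem.List.pyGet? l 0).getD 0
def bOf (l : List Int) : Int := (PySem.List.pyGet? l 1).getD 0

theorem aOf_eq (l : List Int) : (PySem.List.pyGet? l 0).getD 0 = aOf l := rfl
theorem bOf_eq (l : List Int) : (PySem.List.pyGet? l 1).getD 0 = bOf l := rfl

-- "some interval of q covers v"
def coversB (q : List (List Int)) (v : Int) : Bool := q.any (fun l => decide (aOf l ≤ v ∧ v ≤ bOf l))
-- "some segment covers v"
def covSeg (segs : List (Int × Int)) (v : Int) : Bool := segs.any (fun s => decide (s.1 ≤ v ∧ v ≤ s.2))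

theorem mem_addInterval (ligne : List Int) (j b x : Int) :
    x ∈ addInterval ligne j b ↔ (x ∈ ligne ∨ (j ≤ x ∧ x ≤ b)) := by
  rw [addInterval]
  split
  · rename_i h
    rw [mem_addInterval]
    by_cases hj : j ∈ ligne
    · simp only [hj, if_true]
      constructor
      · rintro (hx | hx)
        · exact Or.inl hx
        · exact Or.inr ⟨by omega, by omega⟩
      · rintro (hx | hx)
        · exact Or.inl hx
        · by_cases hxj : x = j
          · exact Or.inl (hxj ▸ hj)
          · exact Or.inr ⟨by omega, by omega⟩
    · simp only [hj, if_false, List.mem_append, List.mem_singleton]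
      constructor
      · rintro ((hx | hx) | hx)
        · exact Or.inl hx
        · exact Or.inr ⟨by omega, by omega⟩
        · exact Or.inr ⟨by omega, by omega⟩
      · rintro (hx | hx)
        · exact Or.inl (Or.inl hx)
        · by_cases hxj : x = j
          · exact Or.inl (Or.inr hxj)
          · exact Or.inr ⟨by omega, by omega⟩
  · rename_i h
    have : ¬ (j ≤ x ∧ x ≤ b) := by omega
    simp [this]
termination_by (b + 1 - j).toNat
decreasing_by omega

theorem mem_ligne (q : List (List Int)) (init : List Int) (x : Int) :
    x ∈ q.foldl (fun ligne liste => addInterval ligne (aOf liste) (bOf liste)) init ↔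
      (x ∈ init ∨ coversB q x = true) := by
  induction q generalizing init with
  | nil => simp [coversB]
  | cons l t ih =>
    simp only [List.foldl_cons, ih, mem_addInterval, coversB, List.any_cons,
      Bool.or_eq_true, decide_eq_true_iff]
    tauto

theorem buildRow_eq (ligne : List Int) (acc : List Char) (v N : Int) :
    buildRow ligne acc v N =
      acc ++ (PySem.List.pyRange v N 1).map (fun u => if u ∈ ligne then '|' else '.') := by
  rw [buildRow]
  split
  · rename_i h
    rw [buildRow_eq, PySem.List.pyRange_one_cons h]
    by_cases hv : v ∈ ligne <;> simp [hv]
  · rename_i h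
    rw [PySem.List.pyRange_one_eq_nil (by omega)]
    simp
termination_by (N - v).toNat
decreasing_by omega

-- all-false / all-true maps of the pin-character function
theorem map_pin_false (xs : List Int) (p : Int → Bool) (h : ∀ v ∈ xs, p v = false) :
    xs.map (fun v => if p v then '|' else '.') = List.replicate xs.length '.' := by
  induction xs with
  | nil => rfl
  | cons x t ih =>
    simp only [List.map_cons, h x (List.mem_cons_self), List.replicate,
      List.length_cons]
    exact congrArg _ (ih fun v hv => h v (List.mem_cons_of_mem _ hv))

theorem map_pin_true (xs : List Int) (p : Int → Bool) (h : ∀ v ∈ xs, p v = true) :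
    xs.map (fun v => if p v then '|' else '.') = List.replicate xs.length '|' := by
  induction xs with
  | nil => rfl
  | cons x t ih =>
    simp only [List.map_cons, h x (List.mem_cons_self), if_true, List.replicate,
      List.length_cons]
    exact congrArg _ (ih fun v hv => h v (List.mem_cons_of_mem _ hv))

-- closed form of one cursor step
theorem stepB_eq (acc : List Char) (c a b : Int) :
    stepB (acc, c) (a, b) =
      (acc ++ List.replicate (max c a - c).toNat '.' ++
        List.replicate (max (max c a) (b + 1) - max c a).toNat '|', max (max c a) (b + 1)) := by
  unfold stepB
  by_cases h1 : a > c
  · simp only [h1, if_true]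
    by_cases h2 : b + 1 > a
    · simp only [h2, if_true]
      rw [show max c a = a from by omega, show max a (b + 1) = b + 1 from by omega,
        List.append_assoc]
    · simp only [h2, if_false]
      rw [show max c a = a from by omega, show max a (b + 1) = a from by omega]
      simp
  · simp only [h1, if_false]
    rw [show max c a = c from by omega]
    by_cases h2 : b + 1 > c
    · simp only [h2, if_true]
      rw [show max c (b + 1) = b + 1 from by omega]
      simp
    · simp only [h2, if_false]
      rw [show max c (b + 1) = c from by omega]
      simp

-- the whole cursor sweep renders exactly the covered/uncovered pattern of [c, n)
theorem render_spec (n : Int) (segs : List (Int × Int)) (acc : List Char) (c : Int)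
    (hc : c ≤ n) (hb : ∀ s ∈ segs, s.1 ≤ s.2 ∧ s.2 < n)
    (hs : segs.Pairwise (fun s t => s.1 ≤ t.1)) :
    (segs.foldl stepB (acc, c)).1 ++
        List.replicate (n - (segs.foldl stepB (acc, c)).2).toNat '.' =
      acc ++ (PySem.List.pyRange c n 1).map (fun v => if covSeg segs v then '|' else '.') := by
  induction segs generalizing acc c with
  | nil =>
    simp only [List.foldl_nil]
    rw [map_pin_false _ _ (by intro v _; simp [covSeg])]
    rw [PySem.List.length_pyRange_one]
  | cons s t ih =>
    obtain ⟨a, b⟩ := s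
    have hab := hb (a, b) (List.mem_cons_self)
    simp only at hab
    simp only [List.foldl_cons, stepB_eq]
    set c1 := max c a with hc1
    set c2 := max c1 (b + 1) with hc2
    have hm1 : c1 = c ∨ c1 = a := by rw [hc1]; exact max_choice c a
    have hm2 : c2 = c1 ∨ c2 = b + 1 := by rw [hc2]; exact max_choice c1 (b + 1)
    have hle1 : c ≤ c1 ∧ a ≤ c1 := by rw [hc1]; exact ⟨le_max_left _ _, le_max_right _ _⟩
    have hle2 : c1 ≤ c2 ∧ b + 1 ≤ c2 := by rw [hc2]; exact ⟨le_max_left _ _, le_max_right _ _⟩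
    have hc2n : c2 ≤ n := by rcases hm1 with h | h <;> rcases hm2 with h' | h' <;> omega
    rw [ih _ _ hc2n (fun s hsmem => hb s (List.mem_cons_of_mem _ hsmem)) (List.Pairwise.of_cons hs)]
    rw [PySem.List.pyRange_one_append c c1 n hle1.1 (le_trans hle2.1 hc2n),
        PySem.List.pyRange_one_append c1 c2 n hle2.1 hc2n, List.map_append, List.map_append]
    have hhead : ∀ u ∈ t, a ≤ u.1 := by
      intro u hu
      exact (List.pairwise_cons.mp hs).1 u hu
    have hdots : ((PySem.List.pyRange c c1 1).map (fun v => if covSeg ((a, b) :: t) v then '|' else '.')) = List.replicate (c1 - c).toNat '.' := by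
      rw [map_pin_false]
      · rw [PySem.List.length_pyRange_one]
      · intro v hv
        rw [PySem.List.mem_pyRange_one] at hv
        simp only [covSeg, List.any_cons, Bool.or_eq_false_iff, decide_eq_false_iff_not]
        constructor
        · rcases hm1 with h | h <;> omega
        · simp only [List.any_eq_false, decide_eq_true_eq]
          intro u hu
          have := hhead u hu
          rcases hm1 with h | h <;> omega
    have hbars : ((PySem.List.pyRange c1 c2 1).map (fun v => if covSeg ((a, b) :: t) v then '|' else '.')) = List.replicate (c2 - c1).toNat '|' := by
      rw [map_pin_true]
      · rw [PySem.List.length_pyRange_one]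
      · intro v hv
        rw [PySem.List.mem_pyRange_one] at hv
        simp only [covSeg, List.any_cons, Bool.or_eq_true_iff]
        left
        simp only [decide_eq_true_iff]
        rcases hm2 with h | h <;> constructor <;> omega
    have htail : ((PySem.List.pyRange c2 n 1).map (fun v => if covSeg ((a, b) :: t) v then '|' else '.')) = ((PySem.List.pyRange c2 n 1).map (fun v => if covSeg t v then '|' else '.')) := by
      apply List.map_congr_left
      intro v hv
      rw [PySem.List.mem_pyRange_one] at hv
      have hd : decide (a ≤ v ∧ v ≤ b) = false := decide_eq_false (by omega)
      simp only [covSeg, List.any_cons, hd, Bool.false_or]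
      rfl
    rw [hdots, hbars, htail]
    simp [List.append_assoc]

-- the clipped-segments fold is a filter-map
theorem segs_eq (q : List (List Int)) (n : Int) (acc : List (Int × Int)) :
    q.foldl (fun segs l =>
      if max (aOf l) 0 ≤ min (bOf l) (n - 1) then
        segs ++ [(max (aOf l) 0, min (bOf l) (n - 1))]
      else segs) acc =
      acc ++ ((q.filter (fun l => decide (max (aOf l) 0 ≤ min (bOf l) (n - 1)))).map
        (fun l => (max (aOf l) 0, min (bOf l) (n - 1)))) := by
  induction q generalizing acc with
  | nil => simp
  | cons l t ih =>
    simp only [List.foldl_cons]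
    by_cases h : max (aOf l) 0 ≤ min (bOf l) (n - 1)
    · rw [if_pos h, ih, List.filter_cons_of_pos (by simpa using h), List.map_cons,
        List.append_assoc, List.singleton_append]
    · rw [if_neg h, ih, List.filter_cons_of_neg (by simpa using h)]

-- coverage is invariant under permutation
theorem covSeg_perm {s1 s2 : List (Int × Int)} (h : s1.Perm s2) (v : Int) :
    covSeg s1 v = covSeg s2 v := by
  unfold covSeg
  exact h.any_eq

theorem any_congr_mem {α : Type} (l : List α) (p q : α → Bool) (h : ∀ x ∈ l, p x = q x) :
    l.any p = l.any q := by
  induction l with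
  | nil => rfl
  | cons x t ih =>
    simp only [List.any_cons, h x (List.mem_cons_self),
      ih fun y hy => h y (List.mem_cons_of_mem _ hy)]

-- inside [0, n) the clipped segments cover exactly what the intervals of q cover
theorem covSeg_clip (q : List (List Int)) (n v : Int) (h0 : 0 ≤ v) (hn : v < n) :
    covSeg ((q.filter (fun l => decide (max (aOf l) 0 ≤ min (bOf l) (n - 1)))).map
        (fun l => (max (aOf l) 0, min (bOf l) (n - 1)))) v = coversB q v := by
  unfold covSeg coversB
  rw [List.any_map, List.any_filter]
  apply any_congr_mem
  intro l _
  simp only [Function.comp]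
  by_cases hcov : aOf l ≤ v ∧ v ≤ bOf l
  · have h1 : max (aOf l) 0 ≤ min (bOf l) (n - 1) := by omega
    simp only [h1, decide_true, Bool.true_and, decide_eq_decide]
    omega
  · simp only [decide_eq_false hcov]
    by_cases h1 : max (aOf l) 0 ≤ min (bOf l) (n - 1)
    · simp only [h1, decide_true, Bool.true_and, decide_eq_false_iff_not]
      omega
    · simp [h1]

-- ===== VERDICT (by name: the statement is the Claim_ definition above) =====
theorem afficheQuilles_spec : Claim_equal_afficheQuilles := by
  intro q NTotal _hdom _hpre
  unfold Spec_afficheQuilles afficheQuilles afficheQuilles_alt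
  simp only [aOf_eq, bOf_eq]
  set n := max NTotal 0 with hn
  have hrange : PySem.List.pyRange 0 NTotal 1 = PySem.List.pyRange 0 n 1 := by
    by_cases h : 0 < NTotal
    · congr 1; omega
    · rw [PySem.List.pyRange_one_eq_nil (by omega), PySem.List.pyRange_one_eq_nil (by omega)]
  -- A side
  rw [buildRow_eq]
  simp only [List.nil_append]
  -- B side: segs and its properties
  rw [segs_eq, List.nil_append]
  set clipped := ((q.filter (fun l => decide (max (aOf l) 0 ≤ min (bOf l) (n - 1)))).map
    (fun l => (max (aOf l) 0, min (bOf l) (n - 1)))) with hclip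
  set srt := PySem.List.sorted clipped (fun s => s.1) false with hsrt
  have hperm : srt.Perm clipped := PySem.List.sorted_perm clipped _ false
  have hb : ∀ s ∈ srt, s.1 ≤ s.2 ∧ s.2 < n := by
    intro s hsme
    have : s ∈ clipped := hperm.mem_iff.mp hsme
    rw [hclip] at this
    simp only [List.mem_map, List.mem_filter, decide_eq_true_iff] at this
    obtain ⟨l, ⟨_, hle⟩, rfl⟩ := this
    constructor
    · exact hle
    · simp only
      omega
  have hs : srt.Pairwise (fun s t => s.1 ≤ t.1) := PySem.List.sorted_pairwise clipped _
  rw [render_spec n srt [] 0 (by omega) hb hs]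
  rw [hrange]
  simp only [List.nil_append]
  congr 1
  apply List.map_congr_left
  intro v hv
  rw [PySem.List.mem_pyRange_one] at hv
  rw [covSeg_perm hperm, covSeg_clip q n v (by omega) (by omega)]
  by_cases hm : coversB q v = true
  · simp [mem_ligne, hm]
  · simp [mem_ligne, hm]
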